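-- pv_equiv track=rewrite | github.com/paradedb/sqlalchemy-paradedb | paradedb/sqlalchemy/alembic.py | _strip_non_pdb_qualifiers
-- ===== SOURCE A (Python) =====
-- def _strip_non_pdb_qualifiers(expr: str) -> str:
--     """Strip relation qualifiers outside SQL string literals.
--
--     Preserves tokenizer namespaces like ``pdb.simple`` and leaves quoted literal
--     content untouched (for example regex patterns like ``'run.*'``).
--     """
--     out: list[str] = []
--     i = 0
--     in_single = False
--     while i < len(expr):
--         ch = expr[i]
--
--         if ch == "'":
--             out.append(ch)
--             # Escaped quote inside a string literal: ''.
--             if in_single and i + 1 < len(expr) and expr[i + 1] == "'":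
--                 out.append("'")
--                 i += 2
--                 continue
--             in_single = not in_single
--             i += 1
--             continue
--
--         if not in_single and (ch.isalpha() or ch == "_"):
--             j = i + 1
--             while j < len(expr) and (expr[j].isalnum() or expr[j] == "_"):
--                 j += 1
--
--             token = expr[i:j]
--             if j < len(expr) and expr[j] == ".":
--                 if token.lower() != "pdb":
--                     # Drop relation-like qualifier prefixes, e.g. public.products.
--                     i = j + 1
--                     continue
--                 out.append(token)
--                 out.append(".")
--                 i = j + 1
--                 continue
--
--             out.append(token)
--             i = j
--             continue
--
--         out.append(ch)
--         i += 1
--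
--     return "".join(out)
-- ===== SOURCE B (Python) =====
-- def _is_word(c: str) -> bool:
--     return c.isalnum() or c == "_"
--
--
-- def _strip_segment(seg: str) -> str:
--     """Strip qualifiers in a literal-free segment by splitting on dots.
--
--     For every part followed by a dot, look at its trailing word-run; the token
--     is that run minus its leading digits.  A non-"pdb" token is dropped along
--     with the dot; anything else keeps the part and the dot.
--     """
--     parts = seg.split(".")
--     out = []
--     for p in parts[:-1]:
--         i = len(p)
--         while i > 0 and _is_word(p[i - 1]):
--             i -= 1
--         j = i
--         while j < len(p) and p[j].isdigit():
--             j += 1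
--         token = p[j:]
--         if token and token.lower() != "pdb":
--             out.append(p[:j])
--         else:
--             out.append(p + ".")
--     out.append(parts[-1])
--     return "".join(out)
--
--
-- def _strip_non_pdb_qualifiers(expr: str) -> str:
--     out = []
--     rest = expr
--     while True:
--         head, sep, rest = rest.partition("'")
--         out.append(_strip_segment(head))
--         if not sep:
--             return "".join(out)
--         out.append("'")
--         # copy the single-quoted literal verbatim ('' is an escaped quote)
--         while True:
--             body, sep2, rest = rest.partition("'")
--             out.append(body)
--             if not sep2:
--                 return "".join(out)
--             if rest.startswith("'"):
--                 out.append("''")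
--                 rest = rest[1:]
--             else:
--                 out.append("'")
--                 break
-- ===== Notes on version B (the rewrite author's own statement) =====
-- stated objective: faster
-- what changed: A is a single index-driven per-character scanner with an in-string flag and forward token lookahead; B instead partitions the string into quoted-literal and plain segments (copying literals verbatim) and rewrites each plain segment by splitting it on '.' and inspecting the trailing word-run of each part, dropping non-pdb tokens together with their dot.
import Mathlib
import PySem

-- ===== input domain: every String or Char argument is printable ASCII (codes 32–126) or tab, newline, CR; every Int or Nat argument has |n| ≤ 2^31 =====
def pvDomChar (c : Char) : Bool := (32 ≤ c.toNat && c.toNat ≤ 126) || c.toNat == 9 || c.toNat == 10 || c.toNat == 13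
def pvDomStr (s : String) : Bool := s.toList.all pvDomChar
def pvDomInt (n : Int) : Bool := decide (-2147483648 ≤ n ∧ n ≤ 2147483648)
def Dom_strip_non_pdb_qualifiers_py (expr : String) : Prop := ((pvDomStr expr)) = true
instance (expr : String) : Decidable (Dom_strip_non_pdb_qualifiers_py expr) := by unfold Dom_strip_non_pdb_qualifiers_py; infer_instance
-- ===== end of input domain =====

-- B replaces A's single index-driven scanner (in-string flag + forward token lookahead) by
-- partitioning the input into quoted literals and plain segments and rewriting each plain
-- segment via a split on '.' that inspects the trailing word-run of each part (objective:
-- faster, by replacing the per-character Python loop with chunked str built-ins; same O(n)).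


-- Python's ch.isalpha() / ch.isalnum() / ch.isdigit() agree with Lean's ASCII Char
-- predicates on the ASCII domain Dom_ (exact there).
def pvIsWordStart (c : Char) : Bool := c.isAlpha || c == '_'

def pvIsWord (c : Char) : Bool := c.isAlphanum || c == '_'

-- ===== PORT A =====
-- A's while-loop over index i, ported as the obvious recursion consuming the suffix
-- expr[i:]; the state (in_single, out) is the Bool flag and the returned list.
def pvScanA : List Char → Bool → List Char
  | [], _ => []
  | c :: rest, inS =>
    if c = '\'' then
      if inS then
        -- escaped quote '' inside a string literal: expr[i+1] == "'"
        if rest.head? = some '\'' then '\'' :: '\'' :: pvScanA rest.tail true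
        else '\'' :: pvScanA rest false
      else '\'' :: pvScanA rest true
    else if inS then
      c :: pvScanA rest true
    else if pvIsWordStart c then
      -- inner while loop scanning the token expr[i:j]; expr[j] == "." is the head? test
      let token := c :: rest.takeWhile pvIsWord
      let after := rest.dropWhile pvIsWord
      if after.head? = some '.' then
        if PySem.Chars.lower token ≠ "pdb".toList then pvScanA after.tail false
        else token ++ '.' :: pvScanA after.tail false
      else token ++ pvScanA after false
    else c :: pvScanA rest false
termination_by s _ => s.length
decreasing_by
  all_goals
    have hd := List.length_dropWhile_le pvIsWord rest
    simp only [List.length_cons, List.length_tail] at *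
    omega

def strip_non_pdb_qualifiers_py (expr : String) : String :=
  String.ofList (pvScanA expr.toList false)

-- ===== PORT B =====
-- port of Source B's _strip_segment: the two index while-loops scanning the trailing word-run
-- and its leading digits are ported via reverse/takeWhile (exact same splits p[:i], p[i:j], p[j:]).
def pvStripPart (p : List Char) : List Char :=
  let stem := (p.reverse.dropWhile pvIsWord).reverse      -- p[:i]
  let run := (p.reverse.takeWhile pvIsWord).reverse       -- p[i:]
  let digits := run.takeWhile Char.isDigit                -- p[i:j]
  let token := run.dropWhile Char.isDigit                 -- p[j:]
  if token ≠ [] ∧ PySem.Chars.lower token ≠ "pdb".toList then stem ++ digits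
  else p ++ ['.']

-- the for-loop over parts[:-1] plus the final part
def pvStripParts : List (List Char) → List Char
  | [] => []
  | [p] => p
  | p :: ps => pvStripPart p ++ pvStripParts ps

def pvStripSeg (seg : List Char) : List Char :=
  pvStripParts (seg.splitOn '.')                          -- seg.split(".")

-- Source B's inner while loop copying a literal body; s.partition("'") is ported as
-- takeWhile/dropWhile on (· ≠ '\'').  Returns (body incl. closing quote, remainder).
def pvSplitLit (s : List Char) : List Char × List Char :=
  let body := s.takeWhile (· ≠ '\'')
  let d := s.dropWhile (· ≠ '\'')
  if d = [] then (s, [])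
  else if d.tail.head? = some '\'' then
    -- rest.startswith("'"): an escaped quote, stay inside the literal
    let br := pvSplitLit d.tail.tail
    (body ++ '\'' :: '\'' :: br.1, br.2)
  else (body ++ ['\''], d.tail)
termination_by s.length
decreasing_by
  have hd := List.length_dropWhile_le (fun c => decide (c ≠ '\'')) s
  rename_i hne _
  have : s.dropWhile (fun c => decide (c ≠ '\'')) ≠ [] := hne
  have hpos : 0 < (s.dropWhile (fun c => decide (c ≠ '\''))).length :=
    List.length_pos_of_ne_nil this
  simp only [List.length_tail] at *
  omega

theorem pvSplitLit_snd_length (s : List Char) : (pvSplitLit s).2.length ≤ s.length := by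
  induction s using pvSplitLit.induct with
  | case1 s d h =>
    rw [pvSplitLit]
    dsimp only
    rw [if_pos h]
    simp
  | case2 s d hne hq ih =>
    have hd := List.length_dropWhile_le (fun x => decide (x ≠ '\'')) s
    have hdef : d = List.dropWhile (fun x => decide (x ≠ '\'')) s := rfl
    rw [pvSplitLit]
    dsimp only
    rw [if_neg hne, if_pos hq]
    rw [hdef] at ih
    simp only [List.length_tail] at *
    omega
  | case3 s d hne hq =>
    have hd := List.length_dropWhile_le (fun x => decide (x ≠ '\'')) s
    have hdef : d = List.dropWhile (fun x => decide (x ≠ '\'')) s := rfl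
    have hpos : 0 < (List.dropWhile (fun x => decide (x ≠ '\'')) s).length :=
      List.length_pos_of_ne_nil (by rw [← hdef]; exact hne)
    rw [pvSplitLit]
    dsimp only
    rw [if_neg hne, if_neg hq]
    simp only [List.length_tail] at *
    omega

-- Source B's outer while loop
def pvAltGo (s : List Char) : List Char :=
  let head := s.takeWhile (· ≠ '\'')
  let d := s.dropWhile (· ≠ '\'')
  if d = [] then pvStripSeg head
  else
    let br := pvSplitLit d.tail
    pvStripSeg head ++ '\'' :: br.1 ++ pvAltGo br.2
termination_by s.length
decreasing_by
  have hd := List.length_dropWhile_le (fun c => decide (c ≠ '\'')) s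
  rename_i hne
  have hpos : 0 < (s.dropWhile (fun c => decide (c ≠ '\''))).length :=
    List.length_pos_of_ne_nil hne
  have hl := pvSplitLit_snd_length (s.dropWhile (fun c => decide (c ≠ '\''))).tail
  simp only [List.length_tail] at *
  omega

def strip_non_pdb_qualifiers_py_alt (expr : String) : String :=
  String.ofList (pvAltGo expr.toList)

-- ===== PRECONDITION & SPEC =====
def Spec_strip_non_pdb_qualifiers_py (expr : String) (out : String) : Prop := out = strip_non_pdb_qualifiers_py_alt expr
instance (expr : String) (out : String) : Decidable (Spec_strip_non_pdb_qualifiers_py expr out) := by unfold Spec_strip_non_pdb_qualifiers_py; infer_instance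

-- ===== CLAIM (what is proved, stated in full; the proofs are below) =====
def Claim_equal_strip_non_pdb_qualifiers_py : Prop := ∀ (expr : String), Dom_strip_non_pdb_qualifiers_py expr → Spec_strip_non_pdb_qualifiers_py expr (strip_non_pdb_qualifiers_py expr)

-- ===== LEMMAS AND PROOFS =====

-- character-class facts
theorem pv_charUpper_eq (c : Char) : c.isUpper = (65 ≤ c.toNat && c.toNat ≤ 90) := by
  simp [Char.isUpper, UInt32.le_iff_toNat_le]

theorem pv_charLower_eq (c : Char) : c.isLower = (97 ≤ c.toNat && c.toNat ≤ 122) := by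
  simp [Char.isLower, UInt32.le_iff_toNat_le]

theorem pv_wordstart_word {c : Char} (h : pvIsWordStart c = true) : pvIsWord c = true := by
  simp [pvIsWordStart, pvIsWord, Char.isAlphanum] at *
  rcases h with h | h
  · exact Or.inl (Or.inl h)
  · exact Or.inr h

theorem pv_wordstart_not_digit {c : Char} (h : pvIsWordStart c = true) : c.isDigit = false := by
  have hD : c.isDigit = (48 ≤ c.toNat && c.toNat ≤ 57) := Bool.le_antisymm (fun a => a) fun a => a
  simp [pvIsWordStart] at h
  rcases h with h | h
  · rw [Char.isAlpha, pv_charUpper_eq, pv_charLower_eq] at h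
    rw [hD]; simp at *; omega
  · subst h; decide

-- a suffix that cannot extend a word run or a part: empty or starting with a quote
def pvBlocked (t : List Char) : Prop := t = [] ∨ ∃ t', t = '\'' :: t'

theorem pv_takeWhile_blocked (u t : List Char) (hb : pvBlocked t) :
    (u ++ t).takeWhile pvIsWord = u.takeWhile pvIsWord := by
  rcases hb with rfl | ⟨t', rfl⟩
  · simp
  · rw [List.takeWhile_append]
    split
    · rename_i h
      have hu : u.takeWhile pvIsWord = u := (List.takeWhile_prefix _).eq_of_length h
      rw [hu, List.takeWhile_cons]
      simp [show pvIsWord '\'' = false by decide]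
    · rfl

theorem pv_dropWhile_blocked (u t : List Char) (hb : pvBlocked t) :
    (u ++ t).dropWhile pvIsWord = u.dropWhile pvIsWord ++ t := by
  rcases hb with rfl | ⟨t', rfl⟩
  · simp
  · rw [List.dropWhile_append]
    split
    · rename_i h
      simp only [List.isEmpty_iff] at h
      rw [h, List.dropWhile_cons]
      simp [show pvIsWord '\'' = false by decide]
    · rfl

-- List.splitOn facts
theorem pv_splitOn_cons_dot (r : List Char) : ('.' :: r).splitOn '.' = [] :: r.splitOn '.' := by
  simp [List.splitOn, List.splitOnP_cons]

theorem pv_splitOn_cons (c : Char) (r : List Char) (h : c ≠ '.') :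
    (c :: r).splitOn '.' = (r.splitOn '.').modifyHead (c :: ·) := by
  simp [List.splitOn, List.splitOnP_cons, h]

theorem pv_splitOn_ne_nil (r : List Char) : r.splitOn '.' ≠ [] :=
  List.splitOnP_ne_nil _ r

theorem pv_splitOn_append (u v : List Char) (hu : ∀ c ∈ u, c ≠ '.') :
    (u ++ v).splitOn '.' = (v.splitOn '.').modifyHead (u ++ ·) := by
  induction u with
  | nil =>
    cases h' : List.splitOn '.' v with
    | nil => simp [h']
    | cons p ps => simp [h']
  | cons c u ih =>
    have hc : c ≠ '.' := hu c (by simp)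
    rw [List.cons_append, pv_splitOn_cons c _ hc, ih (fun x hx => hu x (by simp [hx]))]
    cases v.splitOn '.' with
    | nil => rfl
    | cons p ps => simp

-- generic takeWhile/dropWhile facts around a failing element
theorem pv_takeWhile_append_stop (p : Char → Bool) (xs : List Char) (q : Char) (ys : List Char)
    (h : p q = false) : (xs ++ q :: ys).takeWhile p = xs.takeWhile p := by
  rw [List.takeWhile_append]
  split
  · rename_i hl
    have hx : xs.takeWhile p = xs := (List.takeWhile_prefix _).eq_of_length hl
    rw [hx, List.takeWhile_cons, h]
    simp
  · rfl

theorem pv_dropWhile_append_stop (p : Char → Bool) (xs : List Char) (q : Char) (ys : List Char)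
    (h : p q = false) : (xs ++ q :: ys).dropWhile p = xs.dropWhile p ++ q :: ys := by
  rw [List.dropWhile_append]
  split
  · rename_i hl
    simp only [List.isEmpty_iff] at hl
    rw [hl, List.dropWhile_cons, h]
    simp
  · rfl

-- pvStripPart facts
-- the value of pvStripPart on any list decomposed as (stem ++ run) with run all word
-- characters and stem empty or ending in a non-word character
def pvGoodSplit (stem run : List Char) : Prop :=
  (∀ x ∈ run, pvIsWord x = true) ∧
    (stem = [] ∨ ∃ s0 q, stem = s0 ++ [q] ∧ pvIsWord q = false)

theorem pvStripPart_decomp (stem run : List Char) (h : pvGoodSplit stem run) :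
    pvStripPart (stem ++ run) =
      if run.dropWhile Char.isDigit ≠ [] ∧
          PySem.Chars.lower (run.dropWhile Char.isDigit) ≠ "pdb".toList then
        stem ++ run.takeWhile Char.isDigit
      else (stem ++ run) ++ ['.'] := by
  obtain ⟨hrun, hstem⟩ := h
  have hrunrev : ∀ x ∈ run.reverse, pvIsWord x = true := by
    intro x hx; exact hrun x (by simpa using hx)
  have htr : run.reverse.takeWhile pvIsWord = run.reverse :=
    List.takeWhile_eq_self_iff.mpr hrunrev
  have hdr : run.reverse.dropWhile pvIsWord = [] :=
    List.dropWhile_eq_nil_iff.mpr hrunrev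
  rcases hstem with rfl | ⟨s0, q, rfl, hq⟩
  · unfold pvStripPart
    rw [List.nil_append, htr, hdr, List.reverse_reverse]
    dsimp only
    simp
  · have hrev : ((s0 ++ [q]) ++ run).reverse = run.reverse ++ q :: s0.reverse := by simp
    unfold pvStripPart
    rw [hrev, pv_takeWhile_append_stop _ _ _ _ hq, pv_dropWhile_append_stop _ _ _ _ hq,
      htr, hdr, List.reverse_reverse]
    dsimp only
    split <;> simp

-- the canonical such decomposition of an arbitrary list
theorem pvGoodSplit_canon (p : List Char) :
    pvGoodSplit (p.reverse.dropWhile pvIsWord).reverse (p.reverse.takeWhile pvIsWord).reverse ∧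
      p = (p.reverse.dropWhile pvIsWord).reverse ++ (p.reverse.takeWhile pvIsWord).reverse := by
  refine ⟨⟨?_, ?_⟩, ?_⟩
  · intro x hx
    simp only [List.mem_reverse] at hx
    exact List.mem_takeWhile_imp hx
  · rcases hd : p.reverse.dropWhile pvIsWord with _ | ⟨d, ds⟩
    · left; simp
    · right
      refine ⟨ds.reverse, d, by simp, ?_⟩
      have := List.head_dropWhile_not pvIsWord (l := p.reverse) (by rw [hd]; simp)
      have h2 : (p.reverse.dropWhile pvIsWord).head (by rw [hd]; simp) = d := by simp [hd]
      rw [h2] at this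
      simpa using this
  · have h := List.takeWhile_append_dropWhile (p := pvIsWord) (l := p.reverse)
    have h2 : p = (p.reverse.takeWhile pvIsWord ++ p.reverse.dropWhile pvIsWord).reverse := by
      rw [h, List.reverse_reverse]
    rw [List.reverse_append] at h2
    exact h2

theorem pvStripPart_nil : pvStripPart [] = ['.'] := by
  decide

theorem pvStripPart_token (c : Char) (run : List Char) (hc : pvIsWordStart c = true)
    (hr : ∀ x ∈ run, pvIsWord x = true) :
    pvStripPart (c :: run) =
      if PySem.Chars.lower (c :: run) ≠ "pdb".toList then [] else (c :: run) ++ ['.'] := by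
  have hgood : pvGoodSplit [] (c :: run) := by
    constructor
    · intro x hx
      rcases List.mem_cons.mp hx with rfl | hx
      · exact pv_wordstart_word hc
      · exact hr x hx
    · exact Or.inl rfl
  have h := pvStripPart_decomp [] (c :: run) hgood
  rw [List.nil_append] at h
  rw [h, List.dropWhile_cons, List.takeWhile_cons, pv_wordstart_not_digit hc]
  simp

theorem pvStripPart_prepend_nonword (u : List Char) (q : Char) (v : List Char)
    (hq : pvIsWord q = false) : pvStripPart (u ++ q :: v) = u ++ pvStripPart (q :: v) := by
  obtain ⟨⟨hrun, hstem⟩, hdecomp⟩ := pvGoodSplit_canon v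
  set sv := (v.reverse.dropWhile pvIsWord).reverse with hsv
  set rv := (v.reverse.takeWhile pvIsWord).reverse with hrv
  have hgood1 : pvGoodSplit (u ++ q :: sv) rv := by
    refine ⟨hrun, Or.inr ?_⟩
    rcases hstem with hnil | ⟨s0, q0, hs, hq0⟩
    · exact ⟨u, q, by simp [hnil], hq⟩
    · exact ⟨u ++ q :: s0, q0, by simp [hs], hq0⟩
  have hgood2 : pvGoodSplit (q :: sv) rv := by
    refine ⟨hrun, Or.inr ?_⟩
    rcases hstem with hnil | ⟨s0, q0, hs, hq0⟩
    · exact ⟨[], q, by simp [hnil], hq⟩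
    · exact ⟨q :: s0, q0, by simp [hs], hq0⟩
  have e1 : u ++ q :: v = (u ++ q :: sv) ++ rv := by rw [hdecomp]; simp
  have e2 : q :: v = (q :: sv) ++ rv := by rw [hdecomp]; simp
  rw [e1, e2, pvStripPart_decomp _ _ hgood1, pvStripPart_decomp _ _ hgood2]
  split <;> simp

theorem pvStripPart_prepend (c : Char) (v : List Char) (hc : pvIsWordStart c = false)
    (hd : c ≠ '.') : pvStripPart (c :: v) = c :: pvStripPart v := by
  obtain ⟨⟨hrun, hstem⟩, hdecomp⟩ := pvGoodSplit_canon v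
  set sv := (v.reverse.dropWhile pvIsWord).reverse with hsv
  set rv := (v.reverse.takeWhile pvIsWord).reverse with hrv
  have hcase : (∃ s0 q0, c :: sv = s0 ++ [q0] ∧ pvIsWord q0 = false) ∨
      (sv = [] ∧ pvIsWord c = true) := by
    cases hw : pvIsWord c with
    | false =>
      rcases hstem with hnil | ⟨s0, q0, hs, hq0⟩
      · exact Or.inl ⟨[], c, by simp [hnil], hw⟩
      · exact Or.inl ⟨c :: s0, q0, by simp [hs], hq0⟩
    | true =>
      rcases hstem with hnil | ⟨s0, q0, hs, hq0⟩
      · exact Or.inr ⟨hnil, rfl⟩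
      · exact Or.inl ⟨c :: s0, q0, by simp [hs], hq0⟩
  rcases hcase with hcs | ⟨hnil, hw⟩
  · -- c extends the stem
    have hgood1 : pvGoodSplit (c :: sv) rv := ⟨hrun, Or.inr hcs⟩
    have e1 : c :: v = (c :: sv) ++ rv := by rw [hdecomp]; simp
    rw [e1, pvStripPart_decomp _ _ hgood1, hdecomp,
      pvStripPart_decomp _ _ ⟨hrun, hstem⟩]
    split <;> simp
  · -- c is a digit and v is all word characters: c joins the run as a leading digit
    have hdig : c.isDigit = true := by
      simp [pvIsWord, Char.isAlphanum] at hw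
      simp [pvIsWordStart] at hc
      rcases hw with (hw | hw) | hw
      · rw [hc.1] at hw; exact absurd hw (by simp)
      · exact hw
      · exact absurd hw (by simp [hc.2])
    have hv : v = rv := by rw [hdecomp, hnil, List.nil_append]
    have hgood1 : pvGoodSplit [] (c :: rv) := by
      refine ⟨?_, Or.inl rfl⟩
      intro x hx
      rcases List.mem_cons.mp hx with rfl | hx
      · exact hw
      · exact hrun x hx
    have hA := pvStripPart_decomp [] (c :: rv) hgood1
    rw [List.nil_append] at hA
    have hB := pvStripPart_decomp [] rv ⟨hrun, Or.inl rfl⟩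
    rw [List.nil_append] at hB
    rw [hv, hA, hB, List.dropWhile_cons, List.takeWhile_cons, hdig]
    simp only [if_true]
    split <;> simp

-- pvStripSeg step equations
theorem pv_word_ne_dot {c : Char} (h : pvIsWord c = true) : c ≠ '.' := by
  intro rfl'
  rw [rfl'] at h
  exact absurd h (by decide)

theorem pvStripParts_cons (p : List Char) (ps : List (List Char)) (h : ps ≠ []) :
    pvStripParts (p :: ps) = pvStripPart p ++ pvStripParts ps := by
  cases ps with
  | nil => exact absurd rfl h
  | cons a as => rfl

theorem pvStripSeg_dot (r : List Char) : pvStripSeg ('.' :: r) = '.' :: pvStripSeg r := by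
  unfold pvStripSeg
  rw [pv_splitOn_cons_dot, pvStripParts_cons [] _ (pv_splitOn_ne_nil r), pvStripPart_nil]
  rfl

theorem pvStripSeg_cons (c : Char) (r : List Char) (hc : pvIsWordStart c = false)
    (hd : c ≠ '.') : pvStripSeg (c :: r) = c :: pvStripSeg r := by
  unfold pvStripSeg
  rw [pv_splitOn_cons c r hd]
  rcases hsp : r.splitOn '.' with _ | ⟨p0, ps⟩
  · exact absurd hsp (pv_splitOn_ne_nil r)
  cases ps with
  | nil => rfl
  | cons a as =>
    rw [List.modifyHead_cons, pvStripParts_cons (c :: p0) (a :: as) (by simp),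
      pvStripParts_cons p0 (a :: as) (by simp), pvStripPart_prepend c p0 hc hd]
    simp

theorem pvStripSeg_token_dot (c : Char) (run r2 : List Char) (hc : pvIsWordStart c = true)
    (hr : ∀ x ∈ run, pvIsWord x = true) :
    pvStripSeg ((c :: run) ++ '.' :: r2) =
      (if PySem.Chars.lower (c :: run) ≠ "pdb".toList then [] else (c :: run) ++ ['.'])
        ++ pvStripSeg r2 := by
  have hnd : ∀ x ∈ c :: run, x ≠ '.' := by
    intro x hx
    rcases List.mem_cons.mp hx with rfl | hx
    · exact pv_word_ne_dot (pv_wordstart_word hc)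
    · exact pv_word_ne_dot (hr x hx)
  unfold pvStripSeg
  rw [pv_splitOn_append _ _ hnd, pv_splitOn_cons_dot, List.modifyHead_cons,
    pvStripParts_cons _ _ (pv_splitOn_ne_nil r2), List.append_nil,
    pvStripPart_token c run hc hr]

theorem pvStripSeg_token_other (c : Char) (run : List Char) (q : Char) (r2 : List Char)
    (hc : pvIsWordStart c = true) (hr : ∀ x ∈ run, pvIsWord x = true)
    (hq : pvIsWord q = false) (hd : q ≠ '.') :
    pvStripSeg ((c :: run) ++ q :: r2) = (c :: run) ++ pvStripSeg (q :: r2) := by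
  have hnd : ∀ x ∈ c :: run, x ≠ '.' := by
    intro x hx
    rcases List.mem_cons.mp hx with rfl | hx
    · exact pv_word_ne_dot (pv_wordstart_word hc)
    · exact pv_word_ne_dot (hr x hx)
  unfold pvStripSeg
  rw [pv_splitOn_append _ _ hnd, pv_splitOn_cons q r2 hd]
  rcases hsp : r2.splitOn '.' with _ | ⟨p0, ps⟩
  · exact absurd hsp (pv_splitOn_ne_nil r2)
  cases ps with
  | nil => simp [pvStripParts]
  | cons a as =>
    rw [List.modifyHead_cons, List.modifyHead_cons,
      pvStripParts_cons ((c :: run) ++ q :: p0) (a :: as) (by simp),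
      pvStripParts_cons (q :: p0) (a :: as) (by simp),
      pvStripPart_prepend_nonword (c :: run) q p0 hq]
    simp

theorem pvStripSeg_token_end (c : Char) (run : List Char) (hc : pvIsWordStart c = true)
    (hr : ∀ x ∈ run, pvIsWord x = true) : pvStripSeg (c :: run) = c :: run := by
  have hnd : ∀ x ∈ c :: run, x ≠ '.' := by
    intro x hx
    rcases List.mem_cons.mp hx with rfl | hx
    · exact pv_word_ne_dot (pv_wordstart_word hc)
    · exact pv_word_ne_dot (hr x hx)
  unfold pvStripSeg
  have h0 : ([] : List Char).splitOn '.' = [[]] := rfl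
  have := pv_splitOn_append (c :: run) [] hnd
  rw [List.append_nil, h0] at this
  rw [this]
  simp [pvStripParts]

-- unfolding equations for pvScanA
theorem pvScanA_nil (b : Bool) : pvScanA [] b = [] := by
  simp [pvScanA]

theorem pvScanA_quote_false (rest : List Char) :
    pvScanA ('\'' :: rest) false = '\'' :: pvScanA rest true := by
  simp [pvScanA]

theorem pvScanA_quote_true_esc (r2 : List Char) :
    pvScanA ('\'' :: '\'' :: r2) true = '\'' :: '\'' :: pvScanA r2 true := by
  simp [pvScanA]

theorem pvScanA_quote_true_end (rest : List Char) (h : ∀ r2, rest ≠ '\'' :: r2) :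
    pvScanA ('\'' :: rest) true = '\'' :: pvScanA rest false := by
  have hh : rest.head? ≠ some '\'' := by
    cases rest with
    | nil => simp
    | cons a r =>
      simp only [List.head?_cons, ne_eq, Option.some.injEq]
      intro ha
      exact h r (by rw [ha])
  simp [pvScanA, hh]

theorem pvScanA_cons_true (c : Char) (rest : List Char) (h1 : c ≠ '\'') :
    pvScanA (c :: rest) true = c :: pvScanA rest true := by
  simp [pvScanA, h1]

theorem pvScanA_cons_other (c : Char) (rest : List Char) (h1 : c ≠ '\'')
    (hs : pvIsWordStart c = false) : pvScanA (c :: rest) false = c :: pvScanA rest false := by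
  simp [pvScanA, h1, hs]

theorem pvScanA_word_dot (c : Char) (rest r2 : List Char) (hc : pvIsWordStart c = true)
    (hdw : rest.dropWhile pvIsWord = '.' :: r2) :
    pvScanA (c :: rest) false =
      if PySem.Chars.lower (c :: rest.takeWhile pvIsWord) ≠ "pdb".toList then pvScanA r2 false
      else (c :: rest.takeWhile pvIsWord) ++ '.' :: pvScanA r2 false := by
  have hq : c ≠ '\'' := by
    intro rfl'; rw [rfl'] at hc; exact absurd hc (by decide)
  simp [pvScanA, hq, hc, hdw]

theorem pvScanA_word_other (c : Char) (rest : List Char) (hc : pvIsWordStart c = true)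
    (hdw : ∀ r2, rest.dropWhile pvIsWord ≠ '.' :: r2) :
    pvScanA (c :: rest) false =
      (c :: rest.takeWhile pvIsWord) ++ pvScanA (rest.dropWhile pvIsWord) false := by
  have hq : c ≠ '\'' := by
    intro rfl'; rw [rfl'] at hc; exact absurd hc (by decide)
  have hh : (rest.dropWhile pvIsWord).head? ≠ some '.' := by
    cases hdd : rest.dropWhile pvIsWord with
    | nil => simp
    | cons a l =>
      simp only [List.head?_cons, ne_eq, Option.some.injEq]
      intro ha
      exact hdw l (by rw [hdd, ha])
  simp [pvScanA, hq, hc, hh]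

-- literal pass-through for A's scanner
theorem pvScanA_true_append (u t : List Char) (hu : ∀ c ∈ u, c ≠ '\'') :
    pvScanA (u ++ t) true = u ++ pvScanA t true := by
  induction u with
  | nil => simp
  | cons c u ih =>
    rw [List.cons_append, pvScanA_cons_true c _ (hu c (by simp)),
      ih (fun x hx => hu x (by simp [hx]))]
    simp

theorem pv_takeWhile_quote_free (s : List Char) :
    ∀ x ∈ s.takeWhile (fun c => decide (c ≠ '\'')), x ≠ '\'' := by
  intro x hx
  have := List.mem_takeWhile_imp hx
  simpa using this

theorem pvScanA_true_quote_free (u : List Char) (hu : ∀ x ∈ u, x ≠ '\'') :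
    pvScanA u true = u := by
  have := pvScanA_true_append u [] hu
  simpa [pvScanA_nil] using this

theorem pvScanA_true_splitLit (t : List Char) :
    pvScanA t true = (pvSplitLit t).1 ++ pvScanA (pvSplitLit t).2 false := by
  induction t using pvSplitLit.induct with
  | case1 s d h =>
    have hs : s = s.takeWhile (fun c => decide (c ≠ '\'')) := by
      conv_lhs => rw [← List.takeWhile_append_dropWhile (p := fun c => decide (c ≠ '\'')) (l := s)]
      rw [show List.dropWhile (fun c => decide (c ≠ '\'')) s = [] from h, List.append_nil]
    rw [pvSplitLit]
    dsimp only
    rw [if_pos h]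
    have hfree : ∀ x ∈ s, x ≠ '\'' := by
      intro x hx
      exact pv_takeWhile_quote_free s x (by rw [← hs]; exact hx)
    rw [pvScanA_true_quote_free s hfree]
    simp [pvScanA_nil]
  | case2 s d hne hq ih =>
    have hd0 : d = '\'' :: d.tail := by
      have hh : (fun c => decide (c ≠ '\'')) (d.head hne) = false :=
        List.head_dropWhile_not _ hne
      have hh2 : d.head hne = '\'' := by simpa using hh
      rw [← hh2]
      exact (List.cons_head_tail (l := d) hne).symm
    have ht : d.tail = '\'' :: d.tail.tail := by
      cases hc : d.tail with
      | nil => rw [hc] at hq; simp at hq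
      | cons a l =>
        have ha : a = '\'' := by rw [hc] at hq; simpa using hq
        simp [ha]
    have hs0 : s = s.takeWhile (fun c => decide (c ≠ '\'')) ++ d :=
      (List.takeWhile_append_dropWhile).symm
    have hs : s = s.takeWhile (fun c => decide (c ≠ '\'')) ++ '\'' :: '\'' :: d.tail.tail := by
      conv_lhs => rw [hs0]
      rw [hd0, ht]
      rfl
    calc pvScanA s true
        = s.takeWhile (fun c => decide (c ≠ '\'')) ++ pvScanA ('\'' :: '\'' :: d.tail.tail) true := by
          conv_lhs => rw [hs]
          exact pvScanA_true_append _ _ (pv_takeWhile_quote_free s)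
      _ = s.takeWhile (fun c => decide (c ≠ '\'')) ++ '\'' :: '\'' ::
            ((pvSplitLit d.tail.tail).1 ++ pvScanA (pvSplitLit d.tail.tail).2 false) := by
          rw [pvScanA_quote_true_esc, ih]
      _ = _ := by
          conv_rhs => rw [pvSplitLit]
          dsimp only
          rw [if_neg hne, if_pos hq]
          dsimp only
          simp only [List.cons_append, List.append_assoc]
          rfl
  | case3 s d hne hq =>
    have hd0 : d = '\'' :: d.tail := by
      have hh : (fun c => decide (c ≠ '\'')) (d.head hne) = false :=
        List.head_dropWhile_not _ hne
      have hh2 : d.head hne = '\'' := by simpa using hh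
      rw [← hh2]
      exact (List.cons_head_tail (l := d) hne).symm
    have hnq : ∀ r2, d.tail ≠ '\'' :: r2 := by
      intro r2 hr
      rw [hr] at hq
      simp at hq
    have hs0 : s = s.takeWhile (fun c => decide (c ≠ '\'')) ++ d :=
      (List.takeWhile_append_dropWhile).symm
    have hs : s = s.takeWhile (fun c => decide (c ≠ '\'')) ++ '\'' :: d.tail := by
      conv_lhs => rw [hs0]
      rw [hd0]
      rfl
    calc pvScanA s true
        = s.takeWhile (fun c => decide (c ≠ '\'')) ++ pvScanA ('\'' :: d.tail) true := by
          conv_lhs => rw [hs]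
          exact pvScanA_true_append _ _ (pv_takeWhile_quote_free s)
      _ = s.takeWhile (fun c => decide (c ≠ '\'')) ++ '\'' :: pvScanA d.tail false := by
          rw [pvScanA_quote_true_end _ hnq]
      _ = _ := by
          conv_rhs => rw [pvSplitLit]
          dsimp only
          rw [if_neg hne, if_neg hq]
          dsimp only
          simp only [List.cons_append, List.append_assoc]
          rfl

-- plain-segment pass-through for A's scanner
theorem pvScanA_false_append (head t : List Char) (hu : ∀ c ∈ head, c ≠ '\'')
    (hb : pvBlocked t) :
    pvScanA (head ++ t) false = pvStripSeg head ++ pvScanA t false := by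
  have hblocked_ne_dot : ∀ z, t ≠ '.' :: z := by
    intro z hz
    rcases hb with rfl | ⟨t', rfl⟩
    · exact absurd hz (by simp)
    · injection hz with h1 _
      exact absurd h1 (by decide)
  suffices H : ∀ n (head : List Char), head.length ≤ n → (∀ c ∈ head, c ≠ '\'') →
      pvScanA (head ++ t) false = pvStripSeg head ++ pvScanA t false by
    exact H head.length head le_rfl hu
  intro n
  induction n with
  | zero =>
    intro head hlen _
    have hnil : head = [] := List.eq_nil_of_length_eq_zero (Nat.le_zero.mp hlen)
    subst hnil
    simp [pvStripSeg, pvStripParts]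
  | succ n ih =>
    intro head hlen hu2
    cases head with
    | nil => simp [pvStripSeg, pvStripParts]
    | cons c h' =>
      have hcq : c ≠ '\'' := hu2 c (by simp)
      have hu' : ∀ x ∈ h', x ≠ '\'' := fun x hx => hu2 x (by simp [hx])
      have hlen' : h'.length ≤ n := by
        simp only [List.length_cons] at hlen
        omega
      by_cases hcs : pvIsWordStart c = true
      · -- a token starts here
        have htk : (h' ++ t).takeWhile pvIsWord = h'.takeWhile pvIsWord :=
          pv_takeWhile_blocked h' t hb
        have hdw : (h' ++ t).dropWhile pvIsWord = h'.dropWhile pvIsWord ++ t :=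
          pv_dropWhile_blocked h' t hb
        have hrun : ∀ x ∈ h'.takeWhile pvIsWord, pvIsWord x = true :=
          fun x hx => List.mem_takeWhile_imp hx
        have hdecomp : h' = h'.takeWhile pvIsWord ++ h'.dropWhile pvIsWord :=
          (List.takeWhile_append_dropWhile).symm
        rcases hdd : h'.dropWhile pvIsWord with _ | ⟨q, r2⟩
        · -- the token runs to the end of head
          rw [List.cons_append, pvScanA_word_other c (h' ++ t) hcs (by
            rw [hdw, hdd]
            simpa using hblocked_ne_dot)]
          rw [htk, hdw, hdd, List.nil_append]
          have hhead : c :: h' = c :: h'.takeWhile pvIsWord := by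
            conv_lhs => rw [hdecomp, hdd]
            simp
          rw [hhead, pvStripSeg_token_end c _ hcs hrun]
        · have hqmem : q ∈ h' := (List.dropWhile_sublist _).subset (by rw [hdd]; simp)
          have hqw : pvIsWord q = false := by
            have hh : (fun x => pvIsWord x) ((h'.dropWhile pvIsWord).head (by rw [hdd]; simp)) = false :=
              List.head_dropWhile_not _ _
            have hh2 : (h'.dropWhile pvIsWord).head (by rw [hdd]; simp) = q := by simp [hdd]
            rw [hh2] at hh
            exact hh
          have hr2len : r2.length ≤ n := by
            have := List.length_dropWhile_le pvIsWord h'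
            rw [hdd] at this
            simp only [List.length_cons] at this
            omega
          have hr2free : ∀ x ∈ r2, x ≠ '\'' := by
            intro x hx
            exact hu' x ((List.dropWhile_sublist _).subset (by rw [hdd]; simp [hx]))
          have hqr2len : (q :: r2).length ≤ n := by
            have := List.length_dropWhile_le pvIsWord h'
            rw [hdd] at this
            have hpos : 0 < h'.length := by
              cases h' with
              | nil => simp at hdd
              | cons a l => simp
            simp only [List.length_cons] at this ⊢
            omega
          by_cases hqd : q = '.'
          · subst hqd
            rw [List.cons_append, pvScanA_word_dot c (h' ++ t) (r2 ++ t) hcs (by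
              rw [hdw, hdd]; simp)]
            rw [htk]
            have hhead : c :: h' = (c :: h'.takeWhile pvIsWord) ++ '.' :: r2 := by
              conv_lhs => rw [hdecomp, hdd]
              simp
            rw [hhead, pvStripSeg_token_dot c _ r2 hcs hrun]
            rw [ih r2 hr2len hr2free]
            split
            · simp
            · simp
          · rw [List.cons_append, pvScanA_word_other c (h' ++ t) hcs (by
              rw [hdw, hdd]
              intro z hz
              injection hz with h1 _
              exact hqd h1)]
            rw [htk, hdw, hdd, List.cons_append,
              ih (q :: r2) hqr2len (by
                intro x hx
                rcases List.mem_cons.mp hx with rfl | hx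
                · exact hu' x hqmem
                · exact hr2free x hx)]
            have hhead : c :: h' = (c :: h'.takeWhile pvIsWord) ++ q :: r2 := by
              conv_lhs => rw [hdecomp, hdd]
              simp
            rw [hhead, pvStripSeg_token_other c _ q r2 hcs hrun hqw hqd]
            simp
      · -- no token starts here
        have hcsf : pvIsWordStart c = false := by
          cases hcc : pvIsWordStart c with
          | false => rfl
          | true => exact absurd hcc hcs
        by_cases hdot : c = '.'
        · subst hdot
          rw [List.cons_append, pvScanA_cons_other '.' _ (by decide) (by decide),
            ih h' hlen' hu', pvStripSeg_dot]
          simp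
        · rw [List.cons_append, pvScanA_cons_other c _ hcq hcsf,
            ih h' hlen' hu', pvStripSeg_cons c h' hcsf hdot]
          simp

theorem pv_main (s : List Char) : pvScanA s false = pvAltGo s := by
  induction s using pvAltGo.induct with
  | case1 s d h =>
    have hts : s.takeWhile (fun c => decide (c ≠ '\'')) = s := by
      have hs0 : s = s.takeWhile (fun c => decide (c ≠ '\'')) ++ d :=
        (List.takeWhile_append_dropWhile).symm
      conv_rhs => rw [hs0]
      rw [show (d : List Char) = [] from h, List.append_nil]
    have hfree : ∀ x ∈ s, x ≠ '\'' := by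
      intro x hx
      exact pv_takeWhile_quote_free s x (by rw [hts]; exact hx)
    have hmain := pvScanA_false_append s [] hfree (Or.inl rfl)
    rw [List.append_nil, pvScanA_nil, List.append_nil] at hmain
    rw [hmain, pvAltGo]
    dsimp only
    rw [if_pos h, hts]
  | case2 s d hne br ih =>
    have hd0 : d = '\'' :: d.tail := by
      have hh : (fun c => decide (c ≠ '\'')) (d.head hne) = false :=
        List.head_dropWhile_not _ hne
      have hh2 : d.head hne = '\'' := by simpa using hh
      rw [← hh2]
      exact (List.cons_head_tail (l := d) hne).symm
    have hs0 : s = s.takeWhile (fun c => decide (c ≠ '\'')) ++ d :=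
      (List.takeWhile_append_dropWhile).symm
    calc pvScanA s false
        = pvScanA (s.takeWhile (fun c => decide (c ≠ '\'')) ++ '\'' :: d.tail) false := by
          conv_lhs => rw [hs0, hd0]
      _ = pvStripSeg (s.takeWhile (fun c => decide (c ≠ '\''))) ++ pvScanA ('\'' :: d.tail) false :=
          pvScanA_false_append _ _ (pv_takeWhile_quote_free s) (Or.inr ⟨d.tail, rfl⟩)
      _ = pvStripSeg (s.takeWhile (fun c => decide (c ≠ '\''))) ++ '\'' ::
            ((pvSplitLit d.tail).1 ++ pvAltGo (pvSplitLit d.tail).2) := by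
          rw [pvScanA_quote_false, pvScanA_true_splitLit, ih]
      _ = pvAltGo s := by
          conv_rhs => rw [pvAltGo]
          dsimp only
          rw [if_neg hne]
          simp only [List.cons_append, List.append_assoc]
          rfl

-- ===== VERDICT (by name: the statement is the Claim_ definition above) =====
theorem strip_non_pdb_qualifiers_py_spec : Claim_equal_strip_non_pdb_qualifiers_py := by
  intro expr _
  unfold Spec_strip_non_pdb_qualifiers_py strip_non_pdb_qualifiers_py strip_non_pdb_qualifiers_py_alt
  rw [pv_main]
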